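-- pv_equiv track=rewrite | github.com/Anthony-Gambale/COMP2550-Project | permutation_indexing.py | lehmer_encode
-- ===== SOURCE A (Python) =====
-- def lehmer_encode(permutation):
--     lehmer_code = []
--     for i in range(len(permutation)):
--         next_entry = 0
--         for j in range(i, len(permutation)):
--             if permutation[j] < permutation[i]:
--                 next_entry += 1
--         lehmer_code.append(next_entry)
--     return lehmer_code
-- ===== SOURCE B (Python) =====
-- def _bisect_left(a, x, lo, hi):
--     # first index in sorted a[lo:hi] whose element is >= x
--     if lo >= hi:
--         return lo
--     mid = (lo + hi) // 2
--     if a[mid] < x: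
--         return _bisect_left(a, x, mid + 1, hi)
--     return _bisect_left(a, x, lo, mid)
--
--
-- def lehmer_encode(permutation):
--     # Scan right-to-left, keeping the already-seen suffix in a sorted list;
--     # each Lehmer entry is the binary-searched insertion point of the current
--     # element, i.e. the number of smaller elements to its right.
--     seen = []
--     code = []
--     for x in reversed(permutation):
--         k = _bisect_left(seen, x, 0, len(seen))
--         code.append(k)
--         seen.insert(k, x)
--     code.reverse()
--     return code
-- ===== Notes on version B (the rewrite author's own statement) =====
-- stated objective: faster
-- what changed: Replaces the per-index rescans of the whole suffix by a single right-to-left pass that keeps the already-seen suffix in a sorted list and reads each Lehmer entry off a hand-written binary search (insertion point = number of smaller elements to the right).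
import Mathlib
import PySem

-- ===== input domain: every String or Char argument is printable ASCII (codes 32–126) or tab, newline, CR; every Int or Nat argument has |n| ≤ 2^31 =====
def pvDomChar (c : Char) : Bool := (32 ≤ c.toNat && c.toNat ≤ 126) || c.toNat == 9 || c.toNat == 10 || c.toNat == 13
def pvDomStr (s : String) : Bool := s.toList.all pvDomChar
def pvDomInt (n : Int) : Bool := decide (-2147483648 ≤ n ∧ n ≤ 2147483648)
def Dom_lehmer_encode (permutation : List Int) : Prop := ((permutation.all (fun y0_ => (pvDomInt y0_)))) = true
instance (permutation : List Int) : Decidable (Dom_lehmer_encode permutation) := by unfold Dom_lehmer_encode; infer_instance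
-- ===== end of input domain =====

-- B replaces A's per-index rescan of the suffix by one right-to-left pass over a
-- sorted list of seen elements with a hand-written binary search (faster).

-- ===== PORT A =====
-- for i in range(len(p)): for j in range(i, len(p)): count p[j] < p[i]; append
def lehmer_encode (permutation : List Int) : List Int :=
  (List.range permutation.length).foldl
    (fun code i =>
      code ++ [((List.range' i (permutation.length - i)).foldl
        (fun next_entry j =>
          if permutation.getD j 0 < permutation.getD i 0 then next_entry + 1 else next_entry)
        (0 : Int))])
    []

-- ===== PORT B =====
-- _bisect_left(a, x, lo, hi): first index in sorted a[lo:hi] with element ≥ x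
def pvBisectLeft (a : List Int) (x : Int) (lo hi : Nat) : Nat :=
  if _h : lo < hi then
    let mid := (lo + hi) / 2
    if a.getD mid 0 < x then pvBisectLeft a x (mid + 1) hi
    else pvBisectLeft a x lo mid
  else lo
termination_by hi - lo
decreasing_by all_goals omega

-- for x in reversed(p): k = bisect; code.append(k); seen.insert(k, x); code.reverse()
def lehmer_encode_alt (permutation : List Int) : List Int :=
  (permutation.reverse.foldl
    (fun (st : List Int × List Int) x =>
      let k := pvBisectLeft st.1 x 0 st.1.length
      (st.1.take k ++ x :: st.1.drop k, st.2 ++ [(k : Int)]))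
    ([], [])).2.reverse

-- ===== PRECONDITION & SPEC =====
def Spec_lehmer_encode (permutation : List Int) (out : List Int) : Prop := out = lehmer_encode_alt permutation
instance (permutation : List Int) (out : List Int) : Decidable (Spec_lehmer_encode permutation out) := by unfold Spec_lehmer_encode; infer_instance

-- ===== CLAIM (what is proved, stated in full; the proofs are below) =====
def Claim_equal_lehmer_encode : Prop := ∀ (permutation : List Int), Dom_lehmer_encode permutation → Spec_lehmer_encode permutation (lehmer_encode permutation)

-- ===== LEMMAS AND PROOFS =====

-- canonical Lehmer code: entry = number of strictly smaller elements to the right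
def pvL : List Int → List Int
  | [] => []
  | x :: xs => ((xs.countP (fun y => y < x) : Nat) : Int) :: pvL xs

-- counting fold over an index range equals countP over the dropped list
theorem pv_countFold (q : Int → Bool) :
    ∀ (k s : Nat) (l : List Int) (c : Int), s + k = l.length →
    (List.range' s k).foldl (fun ne j => if q (l.getD j 0) then ne + 1 else ne) c
      = c + ((l.drop s).countP q : Nat) := by
  intro k
  induction k with
  | zero =>
    intro s l c h
    simp [List.drop_eq_nil_of_le (by omega : l.length ≤ s)]
  | succ k ih =>
    intro s l c h
    have hs : s < l.length := by omega
    rw [List.range'_succ, List.foldl_cons, ih (s + 1) l _ (by omega),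
        List.drop_eq_getElem_cons hs, List.countP_cons]
    simp only [List.getD_eq_getElem?_getD, List.getElem?_eq_getElem hs, Option.getD_some]
    split_ifs with hq <;> push_cast <;> ring

theorem pv_foldl_append_singleton (f : Nat → Int) :
    ∀ (l : List Nat) (acc : List Int),
    l.foldl (fun c i => c ++ [f i]) acc = acc ++ l.map f := by
  intro l
  induction l with
  | nil => simp
  | cons a t ih => intro acc; simp [ih]

-- A's value characterised by countP over suffixes
theorem pv_A_char (p : List Int) :
    lehmer_encode p
      = (List.range p.length).map (fun i => (((p.drop i).countP (fun y => y < p.getD i 0) : Nat) : Int)) := by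
  unfold lehmer_encode
  rw [pv_foldl_append_singleton]
  simp only [List.nil_append]
  apply List.map_congr_left
  intro i hi
  have hi' : i < p.length := List.mem_range.mp hi
  have := pv_countFold (fun y => y < p.getD i 0) (p.length - i) i p 0 (by omega)
  simpa using this

theorem pv_A_eq_L (p : List Int) : lehmer_encode p = pvL p := by
  rw [pv_A_char]
  induction p with
  | nil => simp [pvL]
  | cons x xs ih =>
    simp only [List.length_cons, List.range_succ_eq_map, List.map_cons, List.map_map]
    have h0 : (((x :: xs).drop 0).countP (fun y => y < (x :: xs).getD 0 0) : Nat)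
        = xs.countP (fun y => y < x) := by
      simp [List.countP_cons]
    have h1 : ((List.range xs.length).map
        ((fun i => ((((x :: xs).drop i).countP (fun y => y < (x :: xs).getD i 0) : Nat) : Int)) ∘ Nat.succ))
        = (List.range xs.length).map (fun i => (((xs.drop i).countP (fun y => y < xs.getD i 0) : Nat) : Int)) := by
      apply List.map_congr_left
      intro i _
      simp [Function.comp, List.getD_cons_succ]
    rw [h1, ih]
    simp [pvL, h0]

-- sorted-access: in a sorted list, getD is monotone on in-range indices
theorem pv_sorted_getD_le (a : List Int) (hs : a.Sorted (· ≤ ·)) (i j : Nat)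
    (hij : i ≤ j) (hj : j < a.length) : a.getD i 0 ≤ a.getD j 0 := by
  have hi : i < a.length := lt_of_le_of_lt hij hj
  rw [List.getD_eq_getElem _ _ hi, List.getD_eq_getElem _ _ hj]
  rcases Nat.lt_or_ge i j with h | h
  · exact (List.pairwise_iff_getElem.mp hs) i j hi hj h
  · have : i = j := by omega
    subst this; rfl

-- split point r determines countP
theorem pv_countP_of_split (q : Int → Bool) :
    ∀ (a : List Int) (r : Nat), r ≤ a.length →
    (∀ i, i < r → q (a.getD i 0) = true) →
    (∀ i, r ≤ i → i < a.length → q (a.getD i 0) = false) →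
    a.countP q = r := by
  intro a
  induction a with
  | nil => intro r hr _ _; simp at hr ⊢; omega
  | cons y t ih =>
    intro r hr hpre hpost
    cases r with
    | zero =>
      have hy : q y = false := hpost 0 (Nat.zero_le _) (by simp)
      have ht : t.countP q = 0 := by
        apply ih 0 (Nat.zero_le _) (by intro i hi; omega)
        intro i _ hi
        have := hpost (i + 1) (Nat.zero_le _) (by simpa using Nat.succ_lt_succ hi)
        simpa [List.getD_cons_succ] using this
      simp [List.countP_cons, hy, ht]
    | succ s =>
      have hy : q y = true := by simpa using hpre 0 (Nat.succ_pos _)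
      have ht : t.countP q = s := by
        apply ih s (by simpa using hr)
        · intro i hi
          have := hpre (i + 1) (Nat.succ_lt_succ hi)
          simpa [List.getD_cons_succ] using this
        · intro i hsi hi
          have := hpost (i + 1) (Nat.succ_le_succ hsi) (by simpa using Nat.succ_lt_succ hi)
          simpa [List.getD_cons_succ] using this
      simp [List.countP_cons, hy, ht]

-- binary-search correctness on a sorted list
theorem pv_bisect_spec (a : List Int) (x : Int) :
    ∀ (lo hi : Nat), hi ≤ a.length → lo ≤ hi → a.Sorted (· ≤ ·) →
    (∀ i, i < lo → decide (a.getD i 0 < x) = true) →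
    (∀ i, hi ≤ i → i < a.length → decide (a.getD i 0 < x) = false) →
    pvBisectLeft a x lo hi = a.countP (fun y => y < x) := by
  intro lo hi
  induction lo, hi using pvBisectLeft.induct a x with
  | case1 lo hi h mid hlt ih =>
    intro hhi hlohi hs hpre hpost
    rw [pvBisectLeft]
    simp only [dif_pos h]
    rw [if_pos hlt]
    apply ih (by omega) (by show mid + 1 ≤ hi; omega) hs
    · intro i hi'
      have h1 : a.getD i 0 ≤ a.getD mid 0 :=
        pv_sorted_getD_le a hs i mid (by omega) (by omega)
      exact decide_eq_true (lt_of_le_of_lt h1 hlt)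
    · exact hpost
  | case2 lo hi h mid hge ih =>
    intro hhi hlohi hs hpre hpost
    rw [pvBisectLeft]
    simp only [dif_pos h]
    rw [if_neg hge]
    apply ih (by omega) (by show lo ≤ mid; omega) hs hpre
    intro i hmi hil
    have h1 : a.getD mid 0 ≤ a.getD i 0 := pv_sorted_getD_le a hs mid i hmi hil
    simp only [decide_eq_false_iff_not, not_lt] at hge ⊢
    exact le_trans hge h1
  | case3 lo hi h =>
    intro hhi hlohi hs hpre hpost
    rw [pvBisectLeft]
    simp only [dif_neg h]
    have : lo = hi := by omega
    subst this
    exact (pv_countP_of_split _ a lo hhi hpre (fun i h1 h2 => hpost i h1 h2)).symm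

-- in a sorted list, the first countP(<x) elements are < x and the rest are ≥ x
theorem pv_split_of_sorted (a : List Int) (x : Int) (hs : a.Sorted (· ≤ ·)) :
    (∀ y ∈ a.take (a.countP (fun y => y < x)), y < x) ∧
    (∀ y ∈ a.drop (a.countP (fun y => y < x)), ¬ y < x) := by
  induction a with
  | nil => simp
  | cons h t ih =>
    have hs' : t.Sorted (· ≤ ·) := hs.of_cons
    have hht : ∀ y ∈ t, h ≤ y := fun y hy => List.rel_of_pairwise_cons hs hy
    by_cases hx : h < x
    · have hc : (h :: t).countP (fun y => y < x) = t.countP (fun y => y < x) + 1 := by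
        simp [List.countP_cons, hx]
      rw [hc]
      obtain ⟨ih1, ih2⟩ := ih hs'
      constructor
      · intro y hy
        rw [List.take_succ_cons] at hy
        rcases List.mem_cons.mp hy with rfl | hy
        · exact hx
        · exact ih1 y hy
      · intro y hy
        rw [List.drop_succ_cons] at hy
        exact ih2 y hy
    · have hc : (h :: t).countP (fun y => y < x) = 0 := by
        rw [List.countP_cons]
        have ht0 : t.countP (fun y => y < x) = 0 := by
          rw [List.countP_eq_zero]
          intro y hy
          simp only [decide_eq_true_eq]
          exact fun hyx => hx (lt_of_le_of_lt (hht y hy) hyx)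
        simp [ht0, hx]
      rw [hc]
      refine ⟨by simp, ?_⟩
      intro y hy
      simp only [List.drop_zero] at hy
      rcases List.mem_cons.mp hy with rfl | hy
      · exact hx
      · exact fun hyx => hx (lt_of_le_of_lt (hht y hy) hyx)

-- inserting x at position countP(<x) keeps the list sorted
theorem pv_insert_sorted (a : List Int) (x : Int) (hs : a.Sorted (· ≤ ·)) :
    (a.take (a.countP (fun y => y < x)) ++ x :: a.drop (a.countP (fun y => y < x))).Sorted (· ≤ ·) := by
  obtain ⟨h1, h2⟩ := pv_split_of_sorted a x hs
  set r := a.countP (fun y => y < x) with hr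
  have hts : (a.take r).Sorted (· ≤ ·) := hs.sublist (List.take_sublist r a)
  have hds : (a.drop r).Sorted (· ≤ ·) := hs.sublist (List.drop_sublist r a)
  rw [List.Sorted, List.pairwise_append]
  refine ⟨hts, ?_, ?_⟩
  · rw [List.pairwise_cons]
    exact ⟨fun y hy => le_of_not_gt (fun hg => h2 y hy hg), hds⟩
  · intro u hu v hv
    have hux : u < x := h1 u hu
    rcases List.mem_cons.mp hv with rfl | hv
    · exact le_of_lt hux
    · exact le_of_lt (lt_of_lt_of_le hux (le_of_not_gt (fun hg => h2 v hv hg)))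

-- main invariant of B's right-to-left pass
theorem pv_B_inv (l : List Int) :
    (l.foldr (fun x (st : List Int × List Int) =>
        (st.1.take (pvBisectLeft st.1 x 0 st.1.length) ++ x :: st.1.drop (pvBisectLeft st.1 x 0 st.1.length),
         st.2 ++ [((pvBisectLeft st.1 x 0 st.1.length : Nat) : Int)])) ([], [])).1.Sorted (· ≤ ·) ∧
    (l.foldr (fun x (st : List Int × List Int) =>
        (st.1.take (pvBisectLeft st.1 x 0 st.1.length) ++ x :: st.1.drop (pvBisectLeft st.1 x 0 st.1.length),
         st.2 ++ [((pvBisectLeft st.1 x 0 st.1.length : Nat) : Int)])) ([], [])).1.Perm l ∧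
    (l.foldr (fun x (st : List Int × List Int) =>
        (st.1.take (pvBisectLeft st.1 x 0 st.1.length) ++ x :: st.1.drop (pvBisectLeft st.1 x 0 st.1.length),
         st.2 ++ [((pvBisectLeft st.1 x 0 st.1.length : Nat) : Int)])) ([], [])).2 = (pvL l).reverse := by
  induction l with
  | nil => exact ⟨List.Pairwise.nil, List.Perm.nil, rfl⟩
  | cons x xs ih =>
    obtain ⟨hsort, hperm, hcode⟩ := ih
    rw [List.foldr_cons]
    set st := (xs.foldr (fun x (st : List Int × List Int) =>
        (st.1.take (pvBisectLeft st.1 x 0 st.1.length) ++ x :: st.1.drop (pvBisectLeft st.1 x 0 st.1.length),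
         st.2 ++ [((pvBisectLeft st.1 x 0 st.1.length : Nat) : Int)])) ([], [])) with hst
    have hk : pvBisectLeft st.1 x 0 st.1.length = st.1.countP (fun y => y < x) := by
      apply pv_bisect_spec st.1 x 0 st.1.length (le_refl _) (Nat.zero_le _) hsort
      · intro i hi; omega
      · intro i hi hil; omega
    have hcount : st.1.countP (fun y => y < x) = xs.countP (fun y => y < x) := hperm.countP_eq _
    refine ⟨?_, ?_, ?_⟩
    · simp only [hk]
      exact pv_insert_sorted st.1 x hsort
    · simp only [hk]
      exact (List.perm_middle.trans (by rw [List.take_append_drop] : (x :: (st.1.take (st.1.countP (fun y => y < x)) ++ st.1.drop (st.1.countP (fun y => y < x)))).Perm (x :: st.1))).trans (hperm.cons x)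
    · simp only [hk, hcount, hcode, pvL, List.reverse_cons]

theorem pv_B_eq_L (p : List Int) : lehmer_encode_alt p = pvL p := by
  unfold lehmer_encode_alt
  rw [List.foldl_reverse]
  have := (pv_B_inv p).2.2
  simp only [this]
  exact List.reverse_reverse _

-- ===== VERDICT (by name: the statement is the Claim_ definition above) =====
theorem lehmer_encode_spec : Claim_equal_lehmer_encode := by
  intro p _
  unfold Spec_lehmer_encode
  rw [pv_A_eq_L, pv_B_eq_L]
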